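-- pv_equiv track=rewrite | github.com/pierrebai/Ghost-Diagrams-Qt | ghost-diagrams-Qt-0.9.py | seeders
-- ===== SOURCE A (Python) =====
-- def normalize(form):
--     best = form
--     for i in range(len(form)-1):
--         form = form[1:] + form[0]
--         if form > best: best = form
--     return best
--
-- def seeders(n, seeds, max_connections):
--     seed = seeds[0]
--     other_seeds = seeds[1:]
--     base = len(seed)
--     done = { }
--     for i in range(1, base ** n):
--         grown = ""
--         for j in range(n):
--             grown += seed[(i // (base ** j)) % base]
--         if len(grown) - grown.count('-') > max_connections:
--             continue
--         grown = normalize(grown)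
--         if grown in done or grown.swapcase() in done:
--             continue
--         if other_seeds:
--             for other_grown in seeders(n, other_seeds, max_connections):
--                 result = tuple(sorted((grown,) + other_grown))
--                 swap_result = (t.swapcase() for t in result)
--                 if result in done or swap_result in done:
--                     continue
--                 done[result] = True
--                 yield result
--         else:
--             yield (grown,)
-- ===== SOURCE B (Python) =====
-- # B: iterative candidate construction (repeated divmod digits instead of per-char pow),
-- # normalize as max over all rotations, and the recursive sub-result materialized ONCE
-- # and reused across the outer loop (A re-runs the recursive generator for every i).
-- # Returns a list where A is a generator (same sequence of values).
-- def seeders(n, seeds, max_connections):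
--     seed = seeds[0]
--     rest = seeds[1:]
--     base = len(seed)
--     cands = []
--     for i in range(1, base ** n):
--         q = i
--         grown = ""
--         for _ in range(n):
--             q, d = divmod(q, base)
--             grown += seed[d]
--         if n - grown.count('-') > max_connections:
--             continue
--         cands.append(max(grown[k:] + grown[:k] for k in range(n)))
--     if not rest:
--         return [(g,) for g in cands]
--     if not cands:
--         return []
--     sub = seeders(n, rest, max_connections)
--     seen = set()
--     out = []
--     for g in cands:
--         for o in sub:
--             r = tuple(sorted((g,) + o))
--             if r not in seen:
--                 seen.add(r)
--                 out.append(r)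
--     return out
-- ===== Notes on version B (the rewrite author's own statement) =====
-- stated objective: faster
-- what changed: B materializes the recursive sub-generator once per level and reuses it across the whole outer loop (A re-runs the recursion for every outer index), extracts digits by one repeated divmod instead of computing base**j and a division per character, normalizes by taking the max over all rotations instead of A's rotate-and-compare loop, and dedups results with a set instead of a dict of tuples.
import Mathlib
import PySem

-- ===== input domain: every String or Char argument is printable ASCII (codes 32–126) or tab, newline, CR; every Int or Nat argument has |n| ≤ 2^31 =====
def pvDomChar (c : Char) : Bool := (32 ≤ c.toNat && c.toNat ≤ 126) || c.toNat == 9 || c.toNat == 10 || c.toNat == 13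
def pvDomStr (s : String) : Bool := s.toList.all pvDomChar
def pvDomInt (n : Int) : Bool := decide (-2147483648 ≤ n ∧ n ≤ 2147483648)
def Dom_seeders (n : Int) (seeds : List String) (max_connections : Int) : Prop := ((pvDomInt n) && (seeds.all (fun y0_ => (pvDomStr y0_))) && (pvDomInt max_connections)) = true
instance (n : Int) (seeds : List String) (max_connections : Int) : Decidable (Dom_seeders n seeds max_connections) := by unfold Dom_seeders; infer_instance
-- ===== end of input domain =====

-- B re-implements `seeders` (same return values): it replaces the per-character power/mod
-- digit extraction by one repeated-divmod pass, A's rotate-and-compare loop by a max over all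
-- rotations, and materializes the recursive sub-result once, reused across the outer loop
-- (A re-runs the recursive generator for every outer iteration); dedup via a set, list-returning.
-- A is a generator; the equivalence is about list(seeders(...)).

-- ===== PORT A =====
-- str.swapcase(), hand-ported (exact on the printable-ASCII domain)
def pySwapChar (c : Char) : Char :=
  if PySem.Chars.isupper c then PySem.Chars.lowerChar c
  else if PySem.Chars.islower c then PySem.Chars.upperChar c
  else c

def pySwapStr (s : String) : String := String.ofList (s.toList.map pySwapChar)

-- Keys of A's dict `done`: Python checks membership of a str, of tuples and of a
-- generator object against it; only tuples are ever inserted.  A generator object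
-- compares unequal to every stored (tuple) key, which the distinct constructor models.
inductive DKey where
  | strK : String → DKey
  | tupK : List String → DKey
  | genK : List String → DKey
deriving DecidableEq, Repr

-- normalize(form): rotate len-1 times, keeping the lexicographically largest form
def normalizeA (form : List Char) : List Char :=
  ((PySem.List.pyRange 0 ((form.length : Int) - 1) 1).foldl
    (fun (st : List Char × List Char) _ =>
      -- form = form[1:] + form[0]  (form is nonempty whenever the loop runs)
      let f := st.1.drop 1 ++ st.1.take 1
      (f, if st.2 < f then f else st.2))
    (form, form)).2

def seeders (n : Int) (seeds : List String) (max_connections : Int) : List (List String) :=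
  match seeds with
  | [] => []  -- seeds[0] raises IndexError: excluded by Pre_seeders
  | seed :: other_seeds =>
    let base : Int := (seed.length : Int)
    -- range(1, base ** n): Pre_seeders gives 0 ≤ n (a negative n raises in Python)
    ((PySem.List.pyRange 1 (base ^ n.toNat) 1).foldl
      (fun (st : PySem.Dict DKey Bool × List (List String)) i =>
        -- grown += seed[(i // (base ** j)) % base]; the index is (… % base) ∈ [0, base),
        -- always in range, so the pyGetD default is unreachable
        let grown : List Char := (PySem.List.pyRange 0 n 1).foldl
          (fun g j =>
            g ++ [PySem.List.pyGetD seed.toList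
                    (PySem.Int.mod (PySem.Int.floordiv i (base ^ j.toNat)) base) ' '])
          []
        if ((grown.length : Int) - (PySem.Chars.count grown ['-'] : Int)) > max_connections then st
        else
          let g : String := String.ofList (normalizeA grown)
          if st.1.contains (DKey.strK g) || st.1.contains (DKey.strK (pySwapStr g)) then st
          else if other_seeds ≠ [] then
            (seeders n other_seeds max_connections).foldl
              (fun st2 other_grown =>
                let result : List String := PySem.List.sorted (g :: other_grown) (fun x => x) false
                let swap_result : List String := result.map pySwapStr
                if st2.1.contains (DKey.tupK result) || st2.1.contains (DKey.genK swap_result) then st2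
                else (st2.1.insert (DKey.tupK result) true, st2.2 ++ [result]))
              st
          else (st.1, st.2 ++ [[g]]))
      (PySem.Dict.empty, [])).2

-- ===== PORT B =====
-- max(grown[k:] + grown[:k] for k in range(n)): the largest rotation (n ≥ 1 at every call)
def rotMax (grown : List Char) (n : Int) : List Char :=
  (PySem.List.max?
    ((PySem.List.pyRange 0 n 1).map (fun k =>
      PySem.List.slice grown (some k) none ++ PySem.List.slice grown none (some k)))
    (fun x => x)).getD []

def seeders_alt (n : Int) (seeds : List String) (max_connections : Int) : List (List String) :=
  match seeds with
  | [] => []  -- Source B raises here too: excluded by Pre_seeders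
  | seed :: rest =>
    let base : Int := (seed.length : Int)
    let cands : List String := (PySem.List.pyRange 1 (base ^ n.toNat) 1).foldl
      (fun acc i =>
        -- q, d = divmod(q, base), grown += seed[d]; divmod = (floordiv, mod),
        -- d ∈ [0, base) so the pyGetD default is unreachable
        let qg := (PySem.List.pyRange 0 n 1).foldl
          (fun (st : Int × List Char) _ =>
            (PySem.Int.floordiv st.1 base,
             st.2 ++ [PySem.List.pyGetD seed.toList (PySem.Int.mod st.1 base) ' ']))
          (i, [])
        if (n - (PySem.Chars.count qg.2 ['-'] : Int)) > max_connections then acc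
        else acc ++ [String.ofList (rotMax qg.2 n)])
      []
    if rest.isEmpty then cands.map (fun g => [g])
    else if cands.isEmpty then []
    else
      let sub := seeders_alt n rest max_connections
      (cands.foldl
        (fun (st : PySem.Set (List String) × List (List String)) g =>
          sub.foldl
            (fun st2 o =>
              let r : List String := PySem.List.sorted (g :: o) (fun x => x) false
              if r ∈ st2.1 then st2 else (PySem.Set.add st2.1 r, st2.2 ++ [r]))
            st)
        (PySem.Set.empty, [])).2

-- ===== PRECONDITION & SPEC =====
-- Pre_seeders is exactly where Python A returns: seeds = [] raises IndexError at seeds[0],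
-- and n < 0 makes base ** n a float (or ZeroDivisionError), so range(...) raises.
def Pre_seeders (n : Int) (seeds : List String) (max_connections : Int) : Prop :=
  1 ≤ seeds.length ∧ 0 ≤ n

instance (n : Int) (seeds : List String) (max_connections : Int) :
    Decidable (Pre_seeders n seeds max_connections) := by unfold Pre_seeders; infer_instance

def pvWitness_seeders : Int × List String × Int := (2, ["ab"], 5)

def Spec_seeders (n : Int) (seeds : List String) (max_connections : Int) (out : List (List String)) : Prop := out = seeders_alt n seeds max_connections
instance (n : Int) (seeds : List String) (max_connections : Int) (out : List (List String)) : Decidable (Spec_seeders n seeds max_connections out) := by unfold Spec_seeders; infer_instance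

-- ===== CLAIM (what is proved, stated in full; the proofs are below) =====
def Claim_equal_seeders : Prop := ∀ (n : Int) (seeds : List String) (max_connections : Int), Dom_seeders n seeds max_connections → Pre_seeders n seeds max_connections → Spec_seeders n seeds max_connections (seeders n seeds max_connections)


-- ===== LEMMAS AND PROOFS =====

-- canonical digit/rotation forms shared by the two ports
def chAt (cs : List Char) (b i : Int) (j : Nat) : Char :=
  PySem.List.pyGetD cs (PySem.Int.mod (PySem.Int.floordiv i (b ^ j)) b) ' '

def grownC (cs : List Char) (b i : Int) (m : Nat) : List Char :=
  (List.range m).map (chAt cs b i)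

def rot (cs : List Char) (k : Nat) : List Char := cs.drop k ++ cs.take k

-- A's digit loop (per-index powers) computes the canonical digit string
lemma grownA_eq (cs : List Char) (b i : Int) (m : Nat) :
    (PySem.List.pyRange 0 (m : Int) 1).foldl
      (fun g j => g ++ [PySem.List.pyGetD cs
        (PySem.Int.mod (PySem.Int.floordiv i (b ^ j.toNat)) b) ' ']) []
    = grownC cs b i m := by
  rw [PySem.List.foldl_append_singleton_eq_map, PySem.List.pyRange_one]
  simp [grownC, List.map_map, chAt]

-- B's repeated-divmod loop computes the same digit string (and the final quotient)
lemma grownB_eq (cs : List Char) (b : Int) (hb : 0 < b) (i : Int) (m : Nat) :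
    (PySem.List.pyRange 0 (m : Int) 1).foldl
      (fun (st : Int × List Char) _ =>
        (PySem.Int.floordiv st.1 b,
         st.2 ++ [PySem.List.pyGetD cs (PySem.Int.mod st.1 b) ' ']))
      (i, [])
    = (PySem.Int.floordiv i (b ^ m), grownC cs b i m) := by
  induction m with
  | zero =>
    simp [PySem.List.pyRange_one, grownC, pow_zero,
      PySem.Int.floordiv_eq_ediv_of_pos one_pos]
  | succ m ih =>
    have hc : ((m + 1 : Nat) : Int) = (m : Int) + 1 := by push_cast; ring
    rw [hc, PySem.List.pyRange_one_succ_right (by positivity), List.foldl_append, ih]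
    simp only [List.foldl_cons, List.foldl_nil]
    refine Prod.ext ?_ ?_
    · show PySem.Int.floordiv (PySem.Int.floordiv i (b ^ m)) b = PySem.Int.floordiv i (b ^ (m + 1))
      rw [PySem.Int.floordiv_eq_ediv_of_pos hb, PySem.Int.floordiv_eq_ediv_of_pos (pow_pos hb m),
        PySem.Int.floordiv_eq_ediv_of_pos (pow_pos hb (m + 1)),
        Int.ediv_ediv_of_nonneg (le_of_lt (pow_pos hb m)), pow_succ]
    · show grownC cs b i m ++ _ = grownC cs b i (m + 1)
      simp [grownC, List.range_succ, chAt]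

lemma rot_step (cs : List Char) (m : Nat) (hm : m < cs.length) :
    (rot cs m).drop 1 ++ (rot cs m).take 1 = rot cs (m + 1) := by
  unfold rot
  rw [List.drop_eq_getElem_cons hm,
    show List.take (m + 1) cs = List.take m cs ++ [cs[m]] from by
      rw [List.take_add_one, List.getElem?_eq_getElem hm]; rfl]
  simp only [show ∀ (c : Char) (l : List Char), List.drop 1 (c :: l) = l from fun _ _ => rfl,
    show ∀ (c : Char) (l : List Char), List.take 1 (c :: l) = [c] from fun _ _ => rfl,
    List.append_assoc, List.cons_append, List.nil_append]

lemma if_lt_eq_max (a c : List Char) : (if a < c then c else a) = max a c := by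
  by_cases h : a < c
  · rw [if_pos h, max_eq_right h.le]
  · rw [if_neg h, max_eq_left (not_lt.mp h)]

lemma normalizeA_loop (cs : List Char) (m : Nat) (hm : m < cs.length) :
    (PySem.List.pyRange 0 (m : Int) 1).foldl
      (fun (st : List Char × List Char) _ =>
        let f := st.1.drop 1 ++ st.1.take 1
        (f, if st.2 < f then f else st.2))
      (cs, cs)
    = (rot cs m, ((List.range m).map (fun j => rot cs (j + 1))).foldl max cs) := by
  induction m with
  | zero => simp [PySem.List.pyRange_one, rot]
  | succ m ih =>
    have hc : ((m + 1 : Nat) : Int) = (m : Int) + 1 := by push_cast; ring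
    rw [hc, PySem.List.pyRange_one_succ_right (by positivity), List.foldl_append,
      ih (Nat.lt_of_succ_lt hm)]
    simp only [List.foldl_cons, List.foldl_nil]
    refine Prod.ext ?_ ?_
    · show (rot cs m).drop 1 ++ (rot cs m).take 1 = _
      exact rot_step cs m (Nat.lt_of_succ_lt hm)
    · show (if _ < _ then _ else _) = _
      rw [rot_step cs m (Nat.lt_of_succ_lt hm), if_lt_eq_max]
      simp [List.range_succ]

lemma max?_id_cons_chars (x : List Char) (t : List (List Char)) :
    (PySem.List.max? (x :: t) fun y => y) = some (t.foldl max x) := by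
  have h := PySem.List.max?_id_cons (κ := List Char) x t
  convert h using 2

-- A's rotate-and-keep-best loop equals B's max over all rotations
lemma normalizeA_eq_rotMax (form : List Char) (n : Int)
    (hlen : form.length = n.toNat) (h1 : 1 ≤ form.length) :
    normalizeA form = rotMax form n := by
  obtain ⟨L, hL⟩ : ∃ L, form.length = L + 1 := ⟨form.length - 1, by omega⟩
  have hnc : n = ((L + 1 : Nat) : Int) := by omega
  have hmap : (PySem.List.pyRange 0 ((L + 1 : Nat) : Int) 1).map
      (fun k => PySem.List.slice form (some k) none ++ PySem.List.slice form none (some k))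
      = (List.range (L + 1)).map (rot form) := by
    rw [PySem.List.pyRange_one, List.map_map]
    apply List.map_congr_left
    intro j hj
    simp [rot, PySem.List.slice_from_natCast, PySem.List.slice_to_natCast]
  unfold normalizeA rotMax
  rw [show (form.length : Int) - 1 = ((L : Nat) : Int) from by push_cast [hL]; ring,
    normalizeA_loop form L (by omega), hnc, hmap, List.range_succ_eq_map, List.map_cons,
    show rot form 0 = form from by simp [rot], max?_id_cons_chars]
  simp only [Option.getD_some, List.map_map]
  exact congrArg (List.foldl max form) (List.map_congr_left fun j _ => rfl)

-- invariant tying A's dict `done` to B's set `seen`: only tuple keys, same tuples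
def InvDS (done : PySem.Dict DKey Bool) (seen : PySem.Set (List String)) : Prop :=
  (∀ p ∈ done.items, ∃ t, p.1 = DKey.tupK t) ∧
  (∀ r : List String, done.contains (DKey.tupK r) = true ↔ r ∈ seen)

lemma contains_non_tup_false (done : PySem.Dict DKey Bool)
    (h : ∀ p ∈ done.items, ∃ t, p.1 = DKey.tupK t) (k : DKey)
    (hk : ∀ t, k ≠ DKey.tupK t) : done.contains k = false := by
  by_contra hc
  have hmem : k ∈ done.keys :=
    (PySem.Dict.contains_iff_mem_keys done k).mp (by revert hc; cases done.contains k <;> simp)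
  simp only [PySem.Dict.keys, List.mem_map] at hmem
  obtain ⟨p, hp, hpk⟩ := hmem
  obtain ⟨t, ht⟩ := h p hp
  exact hk t (hpk ▸ ht)

lemma invDS_empty : InvDS PySem.Dict.empty PySem.Set.empty := by
  constructor
  · intro p hp
    simp [PySem.Dict.empty, PySem.Dict.items] at hp
  · intro r
    simp [PySem.Set.empty, PySem.Dict.empty, PySem.Dict.contains]

-- inner per-candidate loop: A's dict-guarded fold = B's set-guarded fold
lemma inner_eq (g : String) (sub : List (List String)) :
    ∀ (done : PySem.Dict DKey Bool) (seen : PySem.Set (List String))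
      (outA outB : List (List String)), InvDS done seen → outA = outB →
    (sub.foldl
      (fun st2 other_grown =>
        let result : List String := PySem.List.sorted (g :: other_grown) (fun x => x) false
        let swap_result : List String := result.map pySwapStr
        if st2.1.contains (DKey.tupK result) || st2.1.contains (DKey.genK swap_result) then st2
        else (st2.1.insert (DKey.tupK result) true, st2.2 ++ [result]))
      (done, outA)).2
    = (sub.foldl
      (fun st2 o =>
        let r : List String := PySem.List.sorted (g :: o) (fun x => x) false
        if r ∈ st2.1 then st2 else (PySem.Set.add st2.1 r, st2.2 ++ [r]))
      (seen, outB)).2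
    ∧ InvDS
      (sub.foldl
        (fun st2 other_grown =>
          let result : List String := PySem.List.sorted (g :: other_grown) (fun x => x) false
          let swap_result : List String := result.map pySwapStr
          if st2.1.contains (DKey.tupK result) || st2.1.contains (DKey.genK swap_result) then st2
          else (st2.1.insert (DKey.tupK result) true, st2.2 ++ [result]))
        (done, outA)).1
      (sub.foldl
        (fun st2 o =>
          let r : List String := PySem.List.sorted (g :: o) (fun x => x) false
          if r ∈ st2.1 then st2 else (PySem.Set.add st2.1 r, st2.2 ++ [r]))
        (seen, outB)).1 := by
  induction sub with
  | nil => intro done seen outA outB hinv hout; exact ⟨hout, hinv⟩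
  | cons o t ih =>
    intro done seen outA outB hinv hout
    simp only [List.foldl_cons]
    have hgen : done.contains (DKey.genK ((PySem.List.sorted (g :: o) (fun x => x) false).map pySwapStr)) = false :=
      contains_non_tup_false done hinv.1 _ (by intro t h; cases h)
    by_cases hr : PySem.List.sorted (g :: o) (fun x => x) false ∈ seen
    · have htup : done.contains (DKey.tupK (PySem.List.sorted (g :: o) (fun x => x) false)) = true :=
        (hinv.2 _).mpr hr
      simp only [htup, hgen, Bool.true_or, if_true, if_pos hr]
      exact ih done seen outA outB hinv hout
    · have htup : done.contains (DKey.tupK (PySem.List.sorted (g :: o) (fun x => x) false)) = false := by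
        revert hr
        rw [← hinv.2 _]
        cases done.contains (DKey.tupK (PySem.List.sorted (g :: o) (fun x => x) false)) <;> simp
      simp only [htup, hgen, Bool.or_self, if_false, if_neg hr, Bool.false_or]
      apply ih
      · constructor
        · intro p hp
          rw [PySem.Dict.mem_items_insert] at hp
          rcases hp with hp | ⟨hp, _⟩
          · exact ⟨_, by rw [hp]⟩
          · exact hinv.1 p hp
        · intro r'
          rw [PySem.Dict.contains_insert, PySem.Set.mem_add]
          simp only [Bool.or_eq_true, beq_iff_eq, DKey.tupK.injEq]
          rw [hinv.2 r']
          tauto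
      · rw [hout]

-- B builds the candidate list first, then folds over it; the composition is one fold
lemma foldl_cands_compose {sigma : Type} (cond : Int → Prop) [DecidablePred cond]
    (cand : Int → String) (G : sigma → String → sigma) (l : List Int) :
    ∀ (c : List String) (s : sigma),
    ((l.foldl (fun acc i => if cond i then acc else acc ++ [cand i]) c).foldl G s)
    = l.foldl (fun s i => if cond i then s else G s (cand i)) (c.foldl G s) := by
  induction l with
  | nil => intro c s; rfl
  | cons i t ih =>
    intro c s
    simp only [List.foldl_cons]
    by_cases hc : cond i
    · rw [if_pos hc, if_pos hc, ih]
    · rw [if_neg hc, if_neg hc, ih, List.foldl_append]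
      rfl

lemma cands_eq_filter_map (cond : Int → Prop) [DecidablePred cond] (cand : Int → String)
    (l : List Int) : ∀ (c : List String),
    l.foldl (fun acc i => if cond i then acc else acc ++ [cand i]) c
    = c ++ (l.filter (fun i => !decide (cond i))).map cand := by
  induction l with
  | nil => intro c; simp
  | cons i t ih =>
    intro c
    simp only [List.foldl_cons, List.filter_cons]
    by_cases hc : cond i
    · simp only [if_pos hc, decide_eq_true hc, Bool.not_true, ih]
      rfl
    · simp only [if_neg hc, decide_eq_false hc, Bool.not_false, ih, List.map_cons]
      simp [List.append_assoc]

-- outer loop, several-seeds case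
lemma master_multi (cond : Int → Prop) [DecidablePred cond] (cand : Int → String)
    (sub : List (List String)) (l : List Int) :
    ∀ (done : PySem.Dict DKey Bool) (seen : PySem.Set (List String))
      (outA outB : List (List String)), InvDS done seen → outA = outB →
    (l.foldl
      (fun st i =>
        if cond i then st
        else
          if st.1.contains (DKey.strK (cand i)) || st.1.contains (DKey.strK (pySwapStr (cand i))) then st
          else sub.foldl
            (fun st2 other_grown =>
              let result : List String := PySem.List.sorted (cand i :: other_grown) (fun x => x) false
              let swap_result : List String := result.map pySwapStr
              if st2.1.contains (DKey.tupK result) || st2.1.contains (DKey.genK swap_result) then st2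
              else (st2.1.insert (DKey.tupK result) true, st2.2 ++ [result]))
            st)
      (done, outA)).2
    = (l.foldl
      (fun st i =>
        if cond i then st
        else sub.foldl
          (fun st2 o =>
            let r : List String := PySem.List.sorted (cand i :: o) (fun x => x) false
            if r ∈ st2.1 then st2 else (PySem.Set.add st2.1 r, st2.2 ++ [r]))
          st)
      (seen, outB)).2 := by
  induction l with
  | nil => intro done seen outA outB hinv hout; exact hout
  | cons i t ih =>
    intro done seen outA outB hinv hout
    simp only [List.foldl_cons]
    by_cases hc : cond i
    · rw [if_pos hc, if_pos hc]
      exact ih done seen outA outB hinv hout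
    · rw [if_neg hc, if_neg hc]
      rw [contains_non_tup_false done hinv.1 (DKey.strK (cand i)) (by intro t h; cases h),
        contains_non_tup_false done hinv.1 (DKey.strK (pySwapStr (cand i))) (by intro t h; cases h)]
      simp only [Bool.or_self, if_false, Bool.false_or]
      have h := inner_eq (cand i) sub done seen outA outB hinv hout
      rw [← Prod.mk.eta (p := sub.foldl
            (fun st2 other_grown =>
              let result : List String := PySem.List.sorted (cand i :: other_grown) (fun x => x) false
              let swap_result : List String := result.map pySwapStr
              if st2.1.contains (DKey.tupK result) || st2.1.contains (DKey.genK swap_result) then st2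
              else (st2.1.insert (DKey.tupK result) true, st2.2 ++ [result]))
            (done, outA)),
          ← Prod.mk.eta (p := sub.foldl
            (fun st2 o =>
              let r : List String := PySem.List.sorted (cand i :: o) (fun x => x) false
              if r ∈ st2.1 then st2 else (PySem.Set.add st2.1 r, st2.2 ++ [r]))
            (seen, outB))]
      exact ih _ _ _ _ h.2 h.1

-- outer loop, single-seed case: the dict never changes, output collects candidates
lemma master_single (cond : Int → Prop) [DecidablePred cond] (cand : Int → String)
    (l : List Int) :
    ∀ (done : PySem.Dict DKey Bool) (out : List (List String)),
      (∀ p ∈ done.items, ∃ t, p.1 = DKey.tupK t) →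
    l.foldl
      (fun st i =>
        if cond i then st
        else
          if st.1.contains (DKey.strK (cand i)) || st.1.contains (DKey.strK (pySwapStr (cand i))) then st
          else (st.1, st.2 ++ [[cand i]]))
      (done, out)
    = (done, out ++ ((l.filter (fun i => !decide (cond i))).map (fun i => [cand i]))) := by
  induction l with
  | nil => intro done out h; simp
  | cons i t ih =>
    intro done out h
    simp only [List.foldl_cons, List.filter_cons]
    by_cases hc : cond i
    · simp only [if_pos hc, decide_eq_true hc, Bool.not_true, ih done out h]
      rfl
    · rw [if_neg hc,
        contains_non_tup_false done h (DKey.strK (cand i)) (by intro t h; cases h),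
        contains_non_tup_false done h (DKey.strK (pySwapStr (cand i))) (by intro t h; cases h)]
      simp only [Bool.or_self, Bool.false_eq_true, if_false, decide_eq_false hc,
        Bool.not_false, List.map_cons]
      rw [ih done _ h]
      simp [List.append_assoc]

-- the two ports agree on every input
lemma seeders_eq_alt : ∀ (seeds : List String) (n : Int) (max_connections : Int),
    seeders n seeds max_connections = seeders_alt n seeds max_connections := by
  intro seeds
  induction seeds with
  | nil => intro n mc; rfl
  | cons seed rest ih =>
    intro n mc
    by_cases hle : (seed.length : Int) ^ n.toNat ≤ 1
    · -- range(1, base ** n) is empty: both sides return []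
      simp only [seeders, seeders_alt, PySem.List.pyRange_one_eq_nil hle, List.foldl_nil,
        List.map_nil]
      by_cases hr : rest.isEmpty <;> simp [hr]
    · have hlt : 1 < (seed.length : Int) ^ n.toNat := lt_of_not_ge hle
      have hb : 0 < (seed.length : Int) := by
        rcases Nat.eq_zero_or_pos seed.length with h0 | hpos
        · exfalso
          rw [show (seed.length : Int) = 0 from by exact_mod_cast congrArg Nat.cast h0] at hlt
          rcases Nat.eq_zero_or_pos n.toNat with hz | hp
          · rw [hz, pow_zero] at hlt; omega
          · rw [zero_pow (by omega)] at hlt; omega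
        · exact_mod_cast hpos
      have hm1 : 1 ≤ n.toNat := by
        by_contra h
        have hz : n.toNat = 0 := by omega
        rw [hz, pow_zero] at hlt; omega
      obtain ⟨m, hmn⟩ : ∃ m : Nat, n = (m : Int) := ⟨n.toNat, by omega⟩
      subst hmn
      rw [Int.toNat_natCast] at hlt hm1
      have hAdef : seeders (m : Int) (seed :: rest) mc =
        ((PySem.List.pyRange 1 ((seed.length : Int) ^ m) 1).foldl
          (fun (st : PySem.Dict DKey Bool × List (List String)) i =>
            let grown : List Char := (PySem.List.pyRange 0 (m : Int) 1).foldl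
              (fun g j =>
                g ++ [PySem.List.pyGetD seed.toList
                  (PySem.Int.mod (PySem.Int.floordiv i ((seed.length : Int) ^ j.toNat))
                    (seed.length : Int)) ' '])
              []
            if ((grown.length : Int) - (PySem.Chars.count grown ['-'] : Int)) > mc then st
            else
              let g : String := String.ofList (normalizeA grown)
              if st.1.contains (DKey.strK g) || st.1.contains (DKey.strK (pySwapStr g)) then st
              else if rest ≠ [] then
                (seeders (m : Int) rest mc).foldl
                  (fun st2 other_grown =>
                    let result : List String := PySem.List.sorted (g :: other_grown) (fun x => x) false
                    let swap_result : List String := result.map pySwapStr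
                    if st2.1.contains (DKey.tupK result) || st2.1.contains (DKey.genK swap_result) then st2
                    else (st2.1.insert (DKey.tupK result) true, st2.2 ++ [result]))
                  st
              else (st.1, st.2 ++ [[g]]))
          (PySem.Dict.empty, [])).2 := rfl
      have hBdef : seeders_alt (m : Int) (seed :: rest) mc =
        (let cands : List String := (PySem.List.pyRange 1 ((seed.length : Int) ^ m) 1).foldl
          (fun acc i =>
            let qg := (PySem.List.pyRange 0 (m : Int) 1).foldl
              (fun (st : Int × List Char) _ =>
                (PySem.Int.floordiv st.1 (seed.length : Int),
                 st.2 ++ [PySem.List.pyGetD seed.toList (PySem.Int.mod st.1 (seed.length : Int)) ' ']))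
              (i, [])
            if ((m : Int) - (PySem.Chars.count qg.2 ['-'] : Int)) > mc then acc
            else acc ++ [String.ofList (rotMax qg.2 (m : Int))])
          []
         if rest.isEmpty then cands.map (fun g => [g])
         else if cands.isEmpty then []
         else
           (cands.foldl
             (fun (st : PySem.Set (List String) × List (List String)) g =>
               (seeders_alt (m : Int) rest mc).foldl
                 (fun st2 o =>
                   let r : List String := PySem.List.sorted (g :: o) (fun x => x) false
                   if r ∈ st2.1 then st2 else (PySem.Set.add st2.1 r, st2.2 ++ [r]))
                 st)
             (PySem.Set.empty, [])).2) := rfl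
      rw [hAdef, hBdef]
      have hnorm : ∀ i : Int,
          normalizeA (grownC seed.toList (seed.length : Int) i m)
          = rotMax (grownC seed.toList (seed.length : Int) i m) (m : Int) := fun i =>
        normalizeA_eq_rotMax _ _ (by simp [grownC]) (by simp [grownC]; omega)
      have hlen : ∀ i : Int,
          (((grownC seed.toList (seed.length : Int) i m).length : Nat) : Int) = (m : Int) := by
        simp [grownC]
      simp only [grownA_eq, grownB_eq seed.toList (seed.length : Int) hb, hnorm, hlen,
        Prod.snd]
      by_cases hrest : rest = []
      · simp only [hrest, List.isEmpty_nil, if_true, ne_eq, not_true_eq_false, if_false]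
        rw [master_single
          (fun i => ((m : Int)) - (PySem.Chars.count (grownC seed.toList ((seed.length : Int)) i m) ['-'] : Int) > mc)
          (fun i => String.ofList (rotMax (grownC seed.toList ((seed.length : Int)) i m) (m : Int)))
          (PySem.List.pyRange 1 ((seed.length : Int) ^ m) 1) PySem.Dict.empty [] invDS_empty.1,
          cands_eq_filter_map
          (fun i => ((m : Int)) - (PySem.Chars.count (grownC seed.toList ((seed.length : Int)) i m) ['-'] : Int) > mc)
          (fun i => String.ofList (rotMax (grownC seed.toList ((seed.length : Int)) i m) (m : Int)))
          (PySem.List.pyRange 1 ((seed.length : Int) ^ m) 1) []]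
        simp [List.map_map]
      · simp only [hrest, ne_eq, not_false_eq_true, if_true, Bool.false_eq_true, if_false,
          show rest.isEmpty = false from by simpa using hrest]
        rw [ih]
        have key := (master_multi
          (fun i => ((m : Int)) - (PySem.Chars.count (grownC seed.toList ((seed.length : Int)) i m) ['-'] : Int) > mc)
          (fun i => String.ofList (rotMax (grownC seed.toList ((seed.length : Int)) i m) (m : Int)))
          (seeders_alt (m : Int) rest mc)
          (PySem.List.pyRange 1 ((seed.length : Int) ^ m) 1)
          PySem.Dict.empty PySem.Set.empty [] [] invDS_empty rfl).trans
          (congrArg (fun p => p.2) (foldl_cands_compose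
            (fun i => ((m : Int)) - (PySem.Chars.count (grownC seed.toList ((seed.length : Int)) i m) ['-'] : Int) > mc)
            (fun i => String.ofList (rotMax (grownC seed.toList ((seed.length : Int)) i m) (m : Int)))
            (fun (st : PySem.Set (List String) × List (List String)) g =>
              (seeders_alt (m : Int) rest mc).foldl
                (fun st2 o =>
                  if PySem.List.sorted (g :: o) (fun x => x) false ∈ st2.1 then st2
                  else (PySem.Set.add st2.1 (PySem.List.sorted (g :: o) (fun x => x) false),
                        st2.2 ++ [PySem.List.sorted (g :: o) (fun x => x) false]))
                st)
            (PySem.List.pyRange 1 ((seed.length : Int) ^ m) 1) [] (PySem.Set.empty, [])).symm)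
        rw [key]
        split
        next h => rw [List.isEmpty_iff.mp h]; rfl
        next h => rfl

-- ===== VERDICT (by name: the statement is the Claim_ definition above) =====
theorem seeders_spec : Claim_equal_seeders := by
  intro n seeds mc _ _
  unfold Spec_seeders
  exact seeders_eq_alt seeds n mc
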